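-- pv_equiv track=rewrite | github.com/GTML-LAB/Equitorch | equitorch/utils/_indices.py | sort_by_column_key
-- ===== SOURCE A (Python) =====
-- from typing import List, Tuple, Any
--
-- def sort_by_column_key(to_sort: List[List[Any]], key: List[List[Any]] = None) -> List[List[Any]]:
--     """
--     Sort the columns of the first 2D list based on the column-wise lexicographical order of the key 2D list.
--
--     Parameters
--     ----------
--     to_sort : List[List[Any]]
--         The first 2D list whose columns are to be sorted.
--     key : List[List[Any]]
--         The key 2D list used to determine the sorting order of columns.
--
--     Returns
--     -------
--     List[List[Any]]
--         The first 2D list with columns sorted according to the column-wise lexicographical order of the key.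
--
--     Raises
--     ------
--     ValueError
--         If either `to_sort` or `key` is empty, or if their lengths do not match.
--
--     Examples
--     --------
--     >>> to_sort = [[1, 2, 3],
--     ...            [4, 5, 6]]
--     >>> key = [[2, 1, 3],
--     ...        [1, 3, 2]]
--     >>> sort_by_column_key(to_sort, key)
--     [[2, 1, 3],
--      [5, 4, 6]]
--     """
--
--     if key is None:
--         key = to_sort
--
--     # 将两个列表转置为列优先的形式
--     to_sort_transposed = list(zip(*to_sort))
--     key_transposed = list(zip(*key))
--     # 将转置后的列表组合成 [(to_sort_col, key_col)] 的形式
--     combined = list(zip(to_sort_transposed, key_transposed))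
--     # 根据 key 的列字典序进行排序
--     sorted_combined = sorted(combined, key=lambda x: x[1])
--     # 提取排序后的 to_sort 的列
--     sorted_to_sort_transposed = [item[0] for item in sorted_combined]
--     # 将转置后的结果还原为原始形式
--     sorted_to_sort = list(zip(*sorted_to_sort_transposed))
--     # 将元组转换为列表
--     sorted_to_sort = [list(row) for row in sorted_to_sort]
--
--     return sorted_to_sort
-- ===== SOURCE B (Python) =====
-- def sort_by_column_key(to_sort, key=None):
--     if key is None:
--         key = to_sort
--     if not to_sort or not key:
--         return []
--     n = min(min(len(r) for r in to_sort), min(len(r) for r in key))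
--     if n == 0:
--         return []
--     data_cols = [[row[j] for row in to_sort] for j in range(n)]
--     key_cols = [[row[j] for row in key] for j in range(n)]
--     # stable insertion sort on two parallel lists: each column goes after
--     # all already-placed columns whose key column compares <= its key column
--     sd, sk = [], []
--     for dc, kc in zip(data_cols, key_cols):
--         i = 0
--         while i < len(sk) and sk[i] <= kc:
--             i += 1
--         sd.insert(i, dc)
--         sk.insert(i, kc)
--     return [[col[r] for col in sd] for r in range(len(to_sort))]
-- ===== Notes on version B (the rewrite author's own statement) =====
-- stated objective: alternative
-- what changed: B never transposes with zip: it extracts columns by index, orders them with a hand-written stable insertion sort maintained on two parallel lists (data columns and key columns), and rebuilds the rows by an index gather; A fuses (column, key-column) pairs and calls the library sort on them.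
import Mathlib
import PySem

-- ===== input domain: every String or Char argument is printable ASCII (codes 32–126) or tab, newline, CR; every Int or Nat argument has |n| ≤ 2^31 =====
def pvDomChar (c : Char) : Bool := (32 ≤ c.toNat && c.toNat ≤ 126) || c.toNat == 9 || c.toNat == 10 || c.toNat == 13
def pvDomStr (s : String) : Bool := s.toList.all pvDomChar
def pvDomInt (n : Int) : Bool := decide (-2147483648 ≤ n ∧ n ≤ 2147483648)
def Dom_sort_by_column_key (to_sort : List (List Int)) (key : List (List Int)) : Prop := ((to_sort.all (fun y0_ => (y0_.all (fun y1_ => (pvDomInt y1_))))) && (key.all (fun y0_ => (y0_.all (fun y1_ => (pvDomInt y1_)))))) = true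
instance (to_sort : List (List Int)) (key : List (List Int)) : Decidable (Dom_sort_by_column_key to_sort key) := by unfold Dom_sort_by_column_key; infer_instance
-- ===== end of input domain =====

-- B avoids A's zip-transpose/decorate/library-sort pipeline: it extracts the columns by index,
-- orders them with a hand-written stable insertion sort kept on two parallel lists, and rebuilds
-- the rows by an index gather (objective: alternative, same asymptotic row cost, quadratic in columns).

-- ===== PORT A =====
-- Exact for Python zip(*rows): stops at the shortest row, empty when rows is empty.
def pyZipStar (rows : List (List Int)) : List (List Int) :=
  if h : rows = [] then []
  else if h2 : rows.any (fun r => r.isEmpty) then []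
  else (rows.map (fun r => r.headD 0)) :: pyZipStar (rows.map List.tail)
termination_by (rows.headD []).length
decreasing_by
  obtain ⟨r, rs, rfl⟩ : ∃ r rs, rows = r :: rs := by
    cases rows with
    | nil => exact absurd rfl h
    | cons r rs => exact ⟨r, rs, rfl⟩
  simp only [List.any_cons, Bool.or_eq_true, List.isEmpty_iff, not_or] at h2
  cases r with
  | nil => exact absurd rfl h2.1
  | cons a as => simp

def sort_by_column_key (to_sort : List (List Int)) (key : List (List Int)) : List (List Int) :=
  let to_sort_transposed := pyZipStar to_sort
  let key_transposed := pyZipStar key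
  let combined := to_sort_transposed.zip key_transposed
  let sorted_combined := PySem.List.sorted combined (fun x => x.2) false
  let sorted_to_sort_transposed := sorted_combined.map (fun item => item.1)
  pyZipStar sorted_to_sort_transposed

-- ===== PORT B =====
-- min(len(r) for r in rows) over a nonempty generator (returns 0 on [], unreachable in B)
def pvMinLen (rows : List (List Int)) : Nat :=
  match rows with
  | [] => 0
  | r :: rs => rs.foldl (fun m s => min m s.length) r.length

-- [[row[j] for row in rows] for j in range(n)]; exact: j < n ≤ len(row) at every use site
def pvCols (rows : List (List Int)) (n : Nat) : List (List Int) :=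
  (List.range n).map (fun j => rows.map (fun row => row.getD j 0))

-- the while loop: index of the first already-placed key column NOT <= kc
def pvFindIdx (sk : List (List Int)) (kc : List Int) : Nat :=
  match sk with
  | [] => 0
  | k :: rest => if k ≤ kc then pvFindIdx rest kc + 1 else 0

-- the for loop over zip(data_cols, key_cols) maintaining the parallel sorted lists (sd, sk)
def pvInsertAll (pairs : List (List Int × List Int)) : List (List Int) × List (List Int) :=
  pairs.foldl (fun acc p =>
    let i := pvFindIdx acc.2 p.2
    (acc.1.insertIdx i p.1, acc.2.insertIdx i p.2)) ([], [])

def sort_by_column_key_alt (to_sort : List (List Int)) (key : List (List Int)) : List (List Int) :=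
  if to_sort.isEmpty || key.isEmpty then []
  else
    let n := min (pvMinLen to_sort) (pvMinLen key)
    if n = 0 then []
    else
      let data_cols := pvCols to_sort n
      let key_cols := pvCols key n
      let sd := (pvInsertAll (data_cols.zip key_cols)).1
      (List.range to_sort.length).map (fun r => sd.map (fun col => col.getD r 0))

-- ===== PRECONDITION & SPEC =====
def Spec_sort_by_column_key (to_sort : List (List Int)) (key : List (List Int)) (out : List (List Int)) : Prop := out = sort_by_column_key_alt to_sort key
instance (to_sort : List (List Int)) (key : List (List Int)) (out : List (List Int)) : Decidable (Spec_sort_by_column_key to_sort key out) := by unfold Spec_sort_by_column_key; infer_instance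

-- ===== CLAIM (what is proved, stated in full; the proofs are below) =====
def Claim_equal_sort_by_column_key : Prop := ∀ (to_sort : List (List Int)) (key : List (List Int)), Dom_sort_by_column_key to_sort key → Spec_sort_by_column_key to_sort key (sort_by_column_key to_sort key)

-- ===== LEMMAS AND PROOFS =====

-- pvMinLen structural recurrences
theorem foldl_min_min (rs : List (List Int)) (a b : Nat) :
    rs.foldl (fun m s => min m s.length) (min a b) = min a (rs.foldl (fun m s => min m s.length) b) := by
  induction rs generalizing b with
  | nil => rfl
  | cons s rs ih => simp only [List.foldl_cons, min_assoc, ih]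

theorem pvMinLen_cons_cons (r s : List Int) (rs : List (List Int)) :
    pvMinLen (r :: s :: rs) = min r.length (pvMinLen (s :: rs)) := by
  simp only [pvMinLen, List.foldl_cons]
  exact foldl_min_min rs r.length s.length

theorem pvMinLen_le (rows : List (List Int)) (r : List Int) (h : r ∈ rows) :
    pvMinLen rows ≤ r.length := by
  induction rows with
  | nil => cases h
  | cons a rows ih =>
    cases rows with
    | nil => simp only [List.mem_singleton] at h; simp [pvMinLen, h]
    | cons b rs =>
      rw [pvMinLen_cons_cons]
      rcases List.mem_cons.mp h with h | h
      · subst h; exact min_le_left _ _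
      · exact le_trans (min_le_right _ _) (ih h)

theorem pvMinLen_pos (rows : List (List Int)) (hne : rows ≠ [])
    (hall : ∀ r ∈ rows, r ≠ []) : 0 < pvMinLen rows := by
  induction rows with
  | nil => exact absurd rfl hne
  | cons a rows ih =>
    have ha : a ≠ [] := hall a (by simp)
    have ha' : 0 < a.length := List.length_pos_iff.mpr ha
    cases rows with
    | nil => simpa [pvMinLen] using ha'
    | cons b rs =>
      rw [pvMinLen_cons_cons]
      exact lt_min ha' (ih (by simp) (fun r hr => hall r (List.mem_cons_of_mem _ hr)))

theorem pvMinLen_tail (rows : List (List Int)) :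
    pvMinLen (rows.map List.tail) = pvMinLen rows - 1 := by
  induction rows with
  | nil => rfl
  | cons a rows ih =>
    cases rows with
    | nil => simp [pvMinLen, List.length_tail]
    | cons b rs =>
      simp only [List.map_cons] at ih ⊢
      rw [pvMinLen_cons_cons, pvMinLen_cons_cons, ih, List.length_tail]
      omega

theorem pvMinLen_zero_of_empty (rows : List (List Int)) (r : List Int)
    (h : r ∈ rows) (hr : r = []) : pvMinLen rows = 0 := by
  have := pvMinLen_le rows r h
  subst hr; simpa using this

theorem pvMinLen_const (rows : List (List Int)) (L : Nat) (hne : rows ≠ [])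
    (hall : ∀ r ∈ rows, r.length = L) : pvMinLen rows = L := by
  induction rows with
  | nil => exact absurd rfl hne
  | cons a rows ih =>
    have ha := hall a (by simp)
    cases rows with
    | nil => simpa [pvMinLen] using ha
    | cons b rs =>
      rw [pvMinLen_cons_cons, ha, ih (by simp) (fun r hr => hall r (List.mem_cons_of_mem _ hr))]
      simp

-- pvCols structural step
theorem getD_tail (r : List Int) (j : Nat) : r.tail.getD j 0 = r.getD (j + 1) 0 := by
  cases r <;> simp

theorem pvCols_zero (rows : List (List Int)) : pvCols rows 0 = [] := rfl

theorem pvCols_succ (rows : List (List Int)) (n : Nat) :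
    pvCols rows (n + 1) = (rows.map (fun r => r.getD 0 0)) :: pvCols (rows.map List.tail) n := by
  simp only [pvCols, List.range_succ_eq_map, List.map_cons, List.map_map]
  congr 1
  exact List.map_congr_left (fun j _ => by
    simp only [Function.comp]
    exact List.map_congr_left (fun r _ => by
      rw [← getD_tail]
      rfl))

-- pyZipStar is the index-based column extraction
theorem pyZipStar_eq_pvCols (rows : List (List Int)) :
    pyZipStar rows = pvCols rows (pvMinLen rows) := by
  generalize hn : pvMinLen rows = n
  induction n using Nat.strong_induction_on generalizing rows with
  | _ n ih =>
    by_cases h : rows = []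
    · subst h
      simp [pvMinLen] at hn
      rw [pyZipStar, ← hn]
      simp [pvCols_zero]
    · by_cases h2 : rows.any (fun r => r.isEmpty)
      · obtain ⟨r, hr, hre⟩ := List.any_eq_true.mp h2
        have h0 : pvMinLen rows = 0 :=
          pvMinLen_zero_of_empty rows r hr (List.isEmpty_iff.mp hre)
        rw [pyZipStar]
        simp only [h, h2]
        rw [← hn, h0, pvCols_zero]
        simp
      · have hall : ∀ r ∈ rows, r ≠ [] := by
          intro r hr hre
          exact h2 (List.any_eq_true.mpr ⟨r, hr, by simp [hre]⟩)
        have hpos : 0 < n := hn ▸ pvMinLen_pos rows h hall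
        obtain ⟨m, rfl⟩ : ∃ m, n = m + 1 := ⟨n - 1, by omega⟩
        have htail : pvMinLen (rows.map List.tail) = m := by
          rw [pvMinLen_tail, hn]; omega
        rw [pyZipStar, dif_neg h, dif_neg (by exact h2),
          ih m (by omega) _ htail, ← htail, pvCols_succ, htail]
        congr 1
        exact List.map_congr_left (fun r _ => by cases r <;> simp)

-- zip of two range-gathers truncates to the shorter range
theorem zip_map_range (f g : Nat → List Int) (na nk : Nat) :
    ((List.range na).map f).zip ((List.range nk).map g)
      = (List.range (min na nk)).map (fun j => (f j, g j)) := by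
  apply List.ext_getElem
  · simp
  · intro i h1 h2
    simp only [List.length_zip, List.length_map, List.length_range] at h1
    simp only [List.getElem_zip, List.getElem_map, List.getElem_range]

theorem zip_pvCols (ts k : List (List Int)) :
    (pvCols ts (pvMinLen ts)).zip (pvCols k (pvMinLen k))
      = (pvCols ts (min (pvMinLen ts) (pvMinLen k))).zip
        (pvCols k (min (pvMinLen ts) (pvMinLen k))) := by
  simp only [pvCols, zip_map_range, min_self]

-- the insertion step of B equals PySem's insertBy, componentwise
theorem insertBy_components (p : List Int × List Int) (s : List (List Int × List Int)) :
    ((PySem.List.insertBy (fun a b => decide (a.2 < b.2)) p s).map Prod.fst,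
     (PySem.List.insertBy (fun a b => decide (a.2 < b.2)) p s).map Prod.snd)
      = ((s.map Prod.fst).insertIdx (pvFindIdx (s.map Prod.snd) p.2) p.1,
         (s.map Prod.snd).insertIdx (pvFindIdx (s.map Prod.snd) p.2) p.2) := by
  induction s with
  | nil => rfl
  | cons q s ih =>
    simp only [PySem.List.insertBy, List.map_cons, pvFindIdx]
    by_cases hlt : p.2 < q.2
    · have : ¬ q.2 ≤ p.2 := not_le.mpr hlt
      simp [hlt, this]
    · have : q.2 ≤ p.2 := not_lt.mp hlt
      simp only [hlt, decide_false, Bool.false_eq_true, if_false, this, if_true,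
        List.map_cons, List.insertIdx_succ_cons]
      rw [Prod.mk.injEq]
      exact ⟨congrArg (List.cons q.1) (congrArg Prod.fst ih),
             congrArg (List.cons q.2) (congrArg Prod.snd ih)⟩

-- the whole insertion loop equals the library stable sort, componentwise
theorem pvInsertAll_eq (pairs : List (List Int × List Int)) :
    pvInsertAll pairs
      = ((PySem.List.sorted pairs (fun x => x.2) false).map Prod.fst,
         (PySem.List.sorted pairs (fun x => x.2) false).map Prod.snd) := by
  rw [PySem.List.sorted_eq_foldl_insertBy]
  show List.foldl _ (([] : List (List Int × List Int)).map Prod.fst, ([] : List (List Int × List Int)).map Prod.snd) pairs = _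
  generalize ([] : List (List Int × List Int)) = s
  induction pairs generalizing s with
  | nil => rfl
  | cons p pairs ih =>
    simp only [List.foldl_cons]
    rw [← insertBy_components p s]
    exact ih _

-- ===== VERDICT (by name: the statement is the Claim_ definition above) =====
theorem sort_by_column_key_spec : Claim_equal_sort_by_column_key := by
  intro to_sort key _
  show sort_by_column_key to_sort key = sort_by_column_key_alt to_sort key
  simp only [sort_by_column_key, sort_by_column_key_alt]
  have hznil : pyZipStar [] = [] := by rw [pyZipStar]; simp
  have hsnil : PySem.List.sorted ([] : List (List Int × List Int)) (fun x => x.2) false = [] := rfl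
  by_cases hts : to_sort = []
  · subst hts
    rw [hznil, List.zip_nil_left,
      hsnil, List.map_nil, hznil]
    simp
  by_cases hk : key = []
  · subst hk
    rw [hznil, List.zip_nil_right,
      hsnil, List.map_nil, hznil]
    simp
  rw [pyZipStar_eq_pvCols to_sort, pyZipStar_eq_pvCols key]
  have hie : (to_sort.isEmpty || key.isEmpty) = false := by
    simp [hts, hk]
  rw [hie]
  simp only [Bool.false_eq_true, if_false]
  set n := min (pvMinLen to_sort) (pvMinLen key) with hn
  by_cases hn0 : n = 0
  · -- one of the column counts is 0: combined is empty, both sides are []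
    rw [zip_pvCols, ← hn, hn0, pvCols_zero, List.zip_nil_left,
      hsnil, List.map_nil, hznil]
    simp
  · rw [zip_pvCols, ← hn]
    simp only [hn0, if_false]
    have hsd := pvInsertAll_eq ((pvCols to_sort n).zip (pvCols key n))
    set pairs := (pvCols to_sort n).zip (pvCols key n) with hpairs
    set srt := PySem.List.sorted pairs (fun x => x.2) false with hsrt
    have hfst : (pvInsertAll pairs).1 = srt.map Prod.fst := by rw [hsd]
    rw [hfst]
    -- final transpose: every sorted column has length to_sort.length
    have hlenp : pairs.length = n := by
      simp [hpairs, pvCols]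
    have hlen : ∀ c ∈ srt.map Prod.fst, c.length = to_sort.length := by
      intro c hc
      obtain ⟨pr, hpr, rfl⟩ := List.mem_map.mp hc
      have hmem : pr ∈ pairs := (PySem.List.mem_sorted _ _ _ _).mp hpr
      have h1 : pr.1 ∈ pvCols to_sort n := (List.of_mem_zip hmem).1
      rw [pvCols] at h1
      obtain ⟨j, hj, hEq⟩ := List.mem_map.mp h1
      rw [← hEq]
      simp
    have hne : srt.map Prod.fst ≠ [] := by
      intro h
      have : srt = [] := by simpa using h
      have := congrArg List.length this
      rw [PySem.List.length_sorted, hlenp] at this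
      exact hn0 (by simpa using this)
    rw [pyZipStar_eq_pvCols, pvMinLen_const _ to_sort.length hne hlen]
    rfl
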